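-- pv_equiv track=rewrite | github.com/medAndro/Algorithm-Solved | 프로그래머스/2/87377. 교점에 별 만들기/교점에 별 만들기.py | convert_zero_based_star_with_max_point
-- ===== SOURCE A (Python) =====
-- def convert_zero_based_star_with_max_point(points, min_xy):
--     x_bias = -min_xy[0]
--     y_bias = -min_xy[1]
--
--     x_max =x_bias +points[0][0]
--     y_max =y_bias +points[0][1]
--
--     zero_based_star = []
--     for point in points:
--         converted_point = (point[0] + x_bias, point[1] + y_bias)
--         zero_based_star.append(converted_point)
--         if converted_point[0] > x_max:
--             x_max = converted_point[0]
--         if converted_point[1] > y_max: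
--             y_max = converted_point[1]
--
--     return zero_based_star, (x_max, y_max)
-- ===== SOURCE B (Python) =====
-- def convert_zero_based_star_with_max_point(points, min_xy):
--     x_bias = -min_xy[0]
--     y_bias = -min_xy[1]
--     shifted = [(x + x_bias, y + y_bias) for x, y in points]
--     x_max = max(p[0] for p in shifted)
--     y_max = max(p[1] for p in shifted)
--     return shifted, (x_max, y_max)
-- ===== Notes on version B (the rewrite author's own statement) =====
-- stated objective: idiomatic
-- what changed: A's single interleaved loop (append + two running-max updates seeded from points[0]) becomes build-then-scan: a comprehension builds the shifted list and two separate max() scans compute the maxima.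
-- outside the precondition, e.g. on convert_zero_based_star_with_max_point([], (0, 0)): A raises IndexError, B raises ValueError
import Mathlib
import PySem

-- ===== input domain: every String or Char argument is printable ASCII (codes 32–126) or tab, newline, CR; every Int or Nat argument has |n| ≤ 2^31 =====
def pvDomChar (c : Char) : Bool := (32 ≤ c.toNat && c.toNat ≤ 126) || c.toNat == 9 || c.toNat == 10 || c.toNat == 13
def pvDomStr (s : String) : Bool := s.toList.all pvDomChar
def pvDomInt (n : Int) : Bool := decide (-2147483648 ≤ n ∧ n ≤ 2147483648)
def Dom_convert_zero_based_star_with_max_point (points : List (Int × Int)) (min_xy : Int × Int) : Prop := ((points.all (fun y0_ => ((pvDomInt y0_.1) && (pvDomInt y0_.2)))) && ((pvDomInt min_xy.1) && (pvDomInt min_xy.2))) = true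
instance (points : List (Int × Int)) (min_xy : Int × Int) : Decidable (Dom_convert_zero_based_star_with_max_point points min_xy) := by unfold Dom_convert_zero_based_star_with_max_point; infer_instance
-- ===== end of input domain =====

-- ===== PORT A =====
-- B replaces A's single interleaved loop (append + running maxima seeded from points[0]) by build-then-scan: map, then two max scans. Same cost; objective: idiomatic.
def convert_zero_based_star_with_max_point (points : List (Int × Int)) (min_xy : Int × Int) : (List (Int × Int)) × (Int × Int) :=
  match points with
  | [] => ([], (0, 0))  -- unreachable under Pre_ (Python A raises IndexError on [])
  | p0 :: _ =>
    let x_bias := -min_xy.1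
    let y_bias := -min_xy.2
    let r := points.foldl
      (fun (st : List (Int × Int) × Int × Int) point =>
        let cp := (point.1 + x_bias, point.2 + y_bias)
        let zs := st.1 ++ [cp]
        let xm := if cp.1 > st.2.1 then cp.1 else st.2.1
        let ym := if cp.2 > st.2.2 then cp.2 else st.2.2
        (zs, xm, ym))
      (([] : List (Int × Int)), (x_bias + p0.1, y_bias + p0.2))
    (r.1, r.2)

-- ===== PORT B =====
def convert_zero_based_star_with_max_point_alt (points : List (Int × Int)) (min_xy : Int × Int) : (List (Int × Int)) × (Int × Int) :=
  match points with
  | [] => ([], (0, 0))  -- unreachable under Pre_ (Python B raises ValueError on [])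
  | _ :: _ =>
    let x_bias := -min_xy.1
    let y_bias := -min_xy.2
    let shifted := points.map (fun p => (p.1 + x_bias, p.2 + y_bias))
    let x_max := (PySem.List.max? (shifted.map Prod.fst) (fun v => v)).getD 0
    let y_max := (PySem.List.max? (shifted.map Prod.snd) (fun v => v)).getD 0
    (shifted, (x_max, y_max))

-- ===== PRECONDITION & SPEC =====
-- Pre_ excludes only the empty list, on which both Pythons raise (A: IndexError, B: ValueError).
def Pre_convert_zero_based_star_with_max_point (points : List (Int × Int)) (min_xy : Int × Int) : Prop := points ≠ []
instance (points : List (Int × Int)) (min_xy : Int × Int) : Decidable (Pre_convert_zero_based_star_with_max_point points min_xy) := by unfold Pre_convert_zero_based_star_with_max_point; infer_instance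
def pvWitness_convert_zero_based_star_with_max_point : (List (Int × Int)) × (Int × Int) := ([(3, -1), (0, 5)], (-2, 1))
def Spec_convert_zero_based_star_with_max_point (points : List (Int × Int)) (min_xy : Int × Int) (out : (List (Int × Int)) × (Int × Int)) : Prop := out = convert_zero_based_star_with_max_point_alt points min_xy
instance (points : List (Int × Int)) (min_xy : Int × Int) (out : (List (Int × Int)) × (Int × Int)) : Decidable (Spec_convert_zero_based_star_with_max_point points min_xy out) := by unfold Spec_convert_zero_based_star_with_max_point; infer_instance

-- ===== CLAIM (what is proved, stated in full; the proofs are below) =====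
def Claim_equal_convert_zero_based_star_with_max_point : Prop := ∀ (points : List (Int × Int)) (min_xy : Int × Int), Dom_convert_zero_based_star_with_max_point points min_xy → Pre_convert_zero_based_star_with_max_point points min_xy → Spec_convert_zero_based_star_with_max_point points min_xy (convert_zero_based_star_with_max_point points min_xy)

-- ===== LEMMAS AND PROOFS =====

theorem fold_step_spec (xb yb : Int) (l : List (Int × Int)) (acc : List (Int × Int)) (xm ym : Int) :
    l.foldl
      (fun (st : List (Int × Int) × Int × Int) point =>
        let cp := (point.1 + xb, point.2 + yb)
        let zs := st.1 ++ [cp]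
        let xm := if cp.1 > st.2.1 then cp.1 else st.2.1
        let ym := if cp.2 > st.2.2 then cp.2 else st.2.2
        (zs, xm, ym))
      (acc, (xm, ym))
    = (acc ++ l.map (fun p => (p.1 + xb, p.2 + yb)),
       ((l.map (fun p => (p.1 + xb, p.2 + yb))).map Prod.fst).foldl max xm,
       ((l.map (fun p => (p.1 + xb, p.2 + yb))).map Prod.snd).foldl max ym) := by
  induction l generalizing acc xm ym with
  | nil => simp
  | cons p t ih =>
    simp only [List.foldl_cons, List.map_cons]
    rw [ih]
    have hx : (if p.1 + xb > xm then p.1 + xb else xm) = max xm (p.1 + xb) := by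
      rw [max_def]; split_ifs <;> omega
    have hy : (if p.2 + yb > ym then p.2 + yb else ym) = max ym (p.2 + yb) := by
      rw [max_def]; split_ifs <;> omega
    simp [hx, hy]

-- ===== VERDICT (by name: the statement is the Claim_ definition above) =====
theorem convert_zero_based_star_with_max_point_spec : Claim_equal_convert_zero_based_star_with_max_point := by
  intro points min_xy _ hpre
  unfold Spec_convert_zero_based_star_with_max_point
  match points with
  | [] => exact absurd rfl hpre
  | p0 :: t =>
    unfold convert_zero_based_star_with_max_point convert_zero_based_star_with_max_point_alt
    simp only [List.map_cons]
    rw [PySem.List.max?_id_cons, PySem.List.max?_id_cons]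
    rw [fold_step_spec]
    have h1 : (-min_xy.1 + p0.1) = p0.1 + -min_xy.1 := by ring
    have h2 : (-min_xy.2 + p0.2) = p0.2 + -min_xy.2 := by ring
    simp [h1, h2, max_self]
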